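-- pv_equiv track=rewrite | github.com/darioncassel/OpenWPM | analysis/ProcessData.py | generate_total_feature_matrix
-- ===== SOURCE A (Python) =====
-- def generate_total_feature_matrix(features_e, features_c):
--     all_topics = []
--     for tl in features_e:
--         for t in tl:
--             if t not in all_topics:
--                 all_topics.append(t)
--     for tl in features_c:
--         for t in tl:
--             if t not in all_topics:
--                 all_topics.append(t)
--     total_matrix = []
--     for tl in features_e:
--         vec = [0] * len(all_topics)
--         for t in tl:
--             i = all_topics.index(t)
--             vec[i] = 1
--         total_matrix.append(vec)
--     for tl in features_c:
--         vec = [0] * len(all_topics)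
--         for t in tl:
--             i = all_topics.index(t)
--             vec[i] = 1
--         total_matrix.append(vec)
--     return all_topics, total_matrix
-- ===== SOURCE B (Python) =====
-- def generate_total_feature_matrix(features_e, features_c):
--     rows = features_e + features_c
--     all_topics = list(dict.fromkeys(t for tl in rows for t in tl))
--     total_matrix = []
--     for tl in rows:
--         s = set(tl)
--         total_matrix.append([1 if t in s else 0 for t in all_topics])
--     return all_topics, total_matrix
-- ===== Notes on version B (the rewrite author's own statement) =====
-- stated objective: faster
-- what changed: all_topics is built by one ordered dict.fromkeys dedup over the concatenated rows instead of nested membership scans, and each row vector is built by gather (membership of each column in a per-row set) instead of scatter via repeated list.index assignments.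
import Mathlib
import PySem

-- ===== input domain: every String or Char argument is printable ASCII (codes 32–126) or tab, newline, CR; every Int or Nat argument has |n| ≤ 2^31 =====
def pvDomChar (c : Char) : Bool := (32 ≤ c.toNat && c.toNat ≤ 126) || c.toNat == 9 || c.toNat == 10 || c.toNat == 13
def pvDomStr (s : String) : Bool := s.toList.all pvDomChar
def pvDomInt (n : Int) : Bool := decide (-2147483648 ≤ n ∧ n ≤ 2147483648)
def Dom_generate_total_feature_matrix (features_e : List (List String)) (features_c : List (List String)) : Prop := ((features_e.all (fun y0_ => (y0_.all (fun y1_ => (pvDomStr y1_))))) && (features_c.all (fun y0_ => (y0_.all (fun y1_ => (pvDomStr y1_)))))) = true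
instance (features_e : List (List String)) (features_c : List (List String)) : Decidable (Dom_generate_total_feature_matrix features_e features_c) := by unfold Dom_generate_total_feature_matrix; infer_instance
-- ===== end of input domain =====

-- B builds all_topics with one ordered dedup over the concatenated rows and each row vector by
-- gathering membership of every column in a per-row set, instead of A's nested membership scans
-- and scatter via list.index; equivalence of return values is proved on all inputs.


-- ===== PORT A =====
-- "for t in tl: if t not in all_topics: all_topics.append(t)"
def pvAddTopicsA (acc : List String) (tl : List String) : List String :=
  tl.foldl (fun acc t => if t ∈ acc then acc else acc ++ [t]) acc

-- "vec = [0]*len(all_topics); for t in tl: i = all_topics.index(t); vec[i] = 1"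
-- (all_topics.index(t) always succeeds here — every t of every row was inserted into
--  all_topics — so the `none` branch, where Python would raise ValueError, is unreachable)
def pvScatterVecA (all_topics : List String) (tl : List String) : List Int :=
  tl.foldl (fun vec t =>
    match PySem.List.index? all_topics t with
    | some i => PySem.List.pySetD vec (i : Int) 1
    | none => vec) (List.replicate all_topics.length 0)

def generate_total_feature_matrix (features_e : List (List String)) (features_c : List (List String)) : List String × List (List Int) :=
  let all_topics := features_c.foldl pvAddTopicsA (features_e.foldl pvAddTopicsA [])
  let total_matrix := features_e.foldl (fun m tl => m ++ [pvScatterVecA all_topics tl]) []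
  let total_matrix := features_c.foldl (fun m tl => m ++ [pvScatterVecA all_topics tl]) total_matrix
  (all_topics, total_matrix)

-- ===== PORT B =====
def generate_total_feature_matrix_alt (features_e : List (List String)) (features_c : List (List String)) : List String × List (List Int) :=
  let rows := features_e ++ features_c
  let all_topics := PySem.List.dedup (rows.flatMap (fun tl => tl))
  let total_matrix := rows.map (fun tl =>
    let s := PySem.Set.ofList tl
    all_topics.map (fun t => if PySem.Set.contains s t then (1 : Int) else 0))
  (all_topics, total_matrix)

-- ===== PRECONDITION & SPEC =====
def Spec_generate_total_feature_matrix (features_e : List (List String)) (features_c : List (List String)) (out : List String × List (List Int)) : Prop := out = generate_total_feature_matrix_alt features_e features_c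
instance (features_e : List (List String)) (features_c : List (List String)) (out : List String × List (List Int)) : Decidable (Spec_generate_total_feature_matrix features_e features_c out) := by unfold Spec_generate_total_feature_matrix; infer_instance

-- ===== CLAIM (what is proved, stated in full; the proofs are below) =====
def Claim_equal_generate_total_feature_matrix : Prop := ∀ (features_e : List (List String)) (features_c : List (List String)), Dom_generate_total_feature_matrix features_e features_c → Spec_generate_total_feature_matrix features_e features_c (generate_total_feature_matrix features_e features_c)

-- ===== LEMMAS AND PROOFS =====

-- A's inner dedup loop over one row is a Set.update
theorem pvAddTopics_eq_update (acc tl : List String) :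
    pvAddTopicsA acc tl = PySem.Set.update acc tl := by
  simp only [pvAddTopicsA, PySem.Set.update, ← PySem.Set.add_eq_ite]

-- A's outer dedup loop is a Set.update with the flattened rows
theorem foldl_addTopics_eq_update (fe : List (List String)) (acc : List String) :
    fe.foldl pvAddTopicsA acc = PySem.Set.update acc (fe.flatMap (fun tl => tl)) := by
  induction fe generalizing acc with
  | nil => simp [PySem.Set.update]
  | cons tl fs ih =>
      simp only [List.foldl_cons, pvAddTopics_eq_update, ih, List.flatMap_cons,
        PySem.Set.update_append]

-- A's nested dedup loops compute the ordered dedup of the flattened rows.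
theorem topicsA_eq_dedup (fe fc : List (List String)) :
    fc.foldl pvAddTopicsA (fe.foldl pvAddTopicsA []) =
      PySem.List.dedup ((fe ++ fc).flatMap (fun tl => tl)) := by
  rw [foldl_addTopics_eq_update, foldl_addTopics_eq_update, ← PySem.Set.update_append,
    PySem.Set.update_nil_left, ← PySem.List.dedup_eq_ofList, List.flatMap_append]

-- writing 1 at t's index in a vector indexed by a nodup topic list
theorem map_set_index (topics : List String) (hnd : topics.Nodup) (t : String) (i : Nat)
    (hidx : PySem.List.index? topics t = some i) (g : String → Int) :
    (topics.map g).set i 1 = topics.map (fun c => if c = t then 1 else g c) := by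
  obtain ⟨hk, hti, _⟩ := PySem.List.getElem_of_index?_eq_some hidx
  apply List.ext_getElem
  · simp
  · intro j hj1 hj2
    have hjt : j < topics.length := by simpa using hj2
    by_cases hji : j = i
    · subst hji
      simp [hti]
    · have hne : topics[j] ≠ t := by
        intro h
        exact hji ((List.Nodup.getElem_inj_iff hnd).mp (h.trans hti.symm))
      have hij : ¬ i = j := fun h => hji h.symm
      simp only [List.getElem_set, List.getElem_map]
      rw [if_neg hij, if_neg hne]

-- A's scatter loop, started from a vector gathered by g, gathers (tl-membership or g)
theorem scatter_fold (topics : List String) (hnd : topics.Nodup) :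
    ∀ (tl : List String) (g : String → Int), (∀ t ∈ tl, t ∈ topics) →
    tl.foldl (fun vec t => match PySem.List.index? topics t with
      | some i => PySem.List.pySetD vec (i : Int) 1
      | none => vec) (topics.map g)
      = topics.map (fun c => if c ∈ tl then 1 else g c) := by
  intro tl
  induction tl with
  | nil => intro g _; simp
  | cons t ts ih =>
      intro g hsub
      have ht : t ∈ topics := hsub t (by simp)
      obtain ⟨i, hi⟩ := Option.isSome_iff_exists.mp
        ((PySem.List.index?_isSome_iff topics t).mpr ht)
      have hstep : (match PySem.List.index? topics t with
            | some i => PySem.List.pySetD (topics.map g) (i : Int) 1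
            | none => topics.map g)
          = topics.map (fun c => if c = t then 1 else g c) := by
        simp only [hi, PySem.List.pySetD_natCast]
        exact map_set_index topics hnd t i hi g
      rw [List.foldl_cons, hstep,
        ih _ (fun x hx => hsub x (List.mem_cons_of_mem _ hx))]
      apply List.map_congr_left
      intro c _
      by_cases h1 : c ∈ ts <;> by_cases h2 : c = t <;> simp [h1, h2]

-- scatter = gather on a nodup topic list containing every element of the row
theorem scatter_eq_gather (topics tl : List String)
    (hnd : topics.Nodup) (hsub : ∀ t ∈ tl, t ∈ topics) :
    pvScatterVecA topics tl = topics.map (fun c => if c ∈ tl then (1 : Int) else 0) := by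
  have h0 : List.replicate topics.length (0 : Int) = topics.map (fun _ => 0) :=
    (List.map_const' ..).symm
  rw [pvScatterVecA, h0, scatter_fold topics hnd tl (fun _ => 0) hsub]

-- ===== VERDICT (by name: the statement is the Claim_ definition above) =====
theorem generate_total_feature_matrix_spec : Claim_equal_generate_total_feature_matrix := by
  intro fe fc _
  unfold Spec_generate_total_feature_matrix generate_total_feature_matrix
    generate_total_feature_matrix_alt
  simp only [topicsA_eq_dedup fe fc]
  set topics := PySem.List.dedup ((fe ++ fc).flatMap (fun tl => tl)) with htopics
  have hnd : topics.Nodup := by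
    rw [htopics, PySem.List.dedup_eq_ofList]; exact PySem.Set.nodup_ofList _
  refine Prod.ext rfl ?_
  rw [PySem.List.foldl_append_singleton_eq_map, PySem.List.foldl_append_singleton_eq_map,
    List.nil_append, ← List.map_append]
  apply List.map_congr_left
  intro tl htl
  rw [scatter_eq_gather topics tl hnd
    (fun t ht => by
      rw [htopics, PySem.List.dedup_eq_ofList, PySem.Set.mem_ofList]
      exact List.mem_flatMap.mpr ⟨tl, htl, ht⟩)]
  apply List.map_congr_left
  intro c _
  by_cases h : c ∈ tl <;> simp [h]
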